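-- pv_equiv track=rewrite | github.com/yszheda/blog | recategorize_articles.py | get_category_from_tags
-- ===== SOURCE A (Python) =====
-- def get_category_from_tags(tags):
--     """
--     Determine category based on exact tag matches (case-insensitive).
--
--     Args:
--         tags: List of tag strings
--
--     Returns:
--         Category string ("tech", "music", or None)
--     """
--     if not tags:
--         return None
--
--     # Convert all tags to lowercase for case-insensitive comparison
--     tags_lower = [tag.lower() for tag in tags]
--
--     # Check for exact matches (case-insensitive)
--     has_tech_tag = "tech" in tags_lower
--     has_classical_music_tag = "classical music" in tags_lower
--
--     # Handle cases with both tags - prioritize tech as it's more specific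
--     if has_tech_tag and has_classical_music_tag:
--         # Both tags present - use tech as priority
--         return "tech"
--     elif has_tech_tag:
--         return "tech"
--     elif has_classical_music_tag:
--         return "music"
--     else:
--         return None
-- ===== SOURCE B (Python) =====
-- def get_category_from_tags(tags):
--     """Single early-exiting pass: return 'tech' on first match, flag classical music."""
--     if not tags:
--         return None
--     found_music = False
--     for tag in tags:
--         t = tag.lower()
--         if t == "tech":
--             return "tech"
--         if t == "classical music":
--             found_music = True
--     return "music" if found_music else None
-- ===== Notes on version B (the rewrite author's own statement) =====
-- stated objective: simpler
-- what changed: Replaces the lowercased-copy list plus two membership scans and a branch cascade by one early-exiting pass that returns 'tech' on the first match and carries a found_music flag.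
import Mathlib
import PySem

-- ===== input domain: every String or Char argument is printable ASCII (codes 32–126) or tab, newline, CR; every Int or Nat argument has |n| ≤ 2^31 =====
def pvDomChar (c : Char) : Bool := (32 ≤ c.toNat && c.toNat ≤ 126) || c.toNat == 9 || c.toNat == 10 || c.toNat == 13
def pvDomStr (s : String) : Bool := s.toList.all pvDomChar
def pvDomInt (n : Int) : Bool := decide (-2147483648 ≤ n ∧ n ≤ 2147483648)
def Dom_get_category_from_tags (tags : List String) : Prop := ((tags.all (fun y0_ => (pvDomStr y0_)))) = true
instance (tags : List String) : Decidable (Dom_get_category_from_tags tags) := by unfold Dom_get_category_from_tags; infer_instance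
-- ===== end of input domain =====

-- B: one early-exiting pass with a found_music flag instead of a lowercased copy and two membership scans (objective: simpler).
-- ===== PORT A =====
def get_category_from_tags (tags : List String) : Option String :=
  if tags = [] then none
  else
    let tags_lower := tags.map PySem.Str.lower
    let has_tech_tag := tags_lower.contains "tech"
    let has_classical_music_tag := tags_lower.contains "classical music"
    if has_tech_tag && has_classical_music_tag then some "tech"
    else if has_tech_tag then some "tech"
    else if has_classical_music_tag then some "music"
    else none

-- ===== PORT B =====
def get_category_from_tags_altLoop : List String → Bool → Option String
  | [], found_music => if found_music then some "music" else none
  | tag :: rest, found_music =>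
    let t := PySem.Str.lower tag
    if t = "tech" then some "tech"
    else get_category_from_tags_altLoop rest (found_music || t = "classical music")

def get_category_from_tags_alt (tags : List String) : Option String :=
  if tags = [] then none else get_category_from_tags_altLoop tags false

-- ===== PRECONDITION & SPEC =====
def Spec_get_category_from_tags (tags : List String) (out : Option String) : Prop := out = get_category_from_tags_alt tags
instance (tags : List String) (out : Option String) : Decidable (Spec_get_category_from_tags tags out) := by unfold Spec_get_category_from_tags; infer_instance

-- ===== CLAIM (what is proved, stated in full; the proofs are below) =====
def Claim_equal_get_category_from_tags : Prop := ∀ (tags : List String), Dom_get_category_from_tags tags → Spec_get_category_from_tags tags (get_category_from_tags tags)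

-- ===== LEMMAS AND PROOFS =====

-- ===== VERDICT (by name: the statement is the Claim_ definition above) =====
theorem altLoop_eq (ts : List String) (found : Bool) :
    get_category_from_tags_altLoop ts found =
      (if (ts.map PySem.Str.lower).contains "tech" then some "tech"
       else if found || (ts.map PySem.Str.lower).contains "classical music" then some "music"
       else none) := by
  induction ts generalizing found with
  | nil => simp [get_category_from_tags_altLoop]
  | cons tag rest ih =>
    simp only [get_category_from_tags_altLoop, ih, List.map_cons, List.contains_cons]
    by_cases h1 : PySem.Str.lower tag = "tech"
    · simp [h1]
    · have h1' : ¬ ("tech" = PySem.Str.lower tag) := fun h => h1 h.symm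
      by_cases h2 : PySem.Str.lower tag = "classical music"
      · simp [h2]
      · have h2' : ¬ ("classical music" = PySem.Str.lower tag) := fun h => h2 h.symm
        simp [h1, h2, h1', h2']

theorem get_category_from_tags_spec : Claim_equal_get_category_from_tags := by
  intro tags _
  unfold Spec_get_category_from_tags get_category_from_tags get_category_from_tags_alt
  by_cases he : tags = []
  · simp [he]
  · simp only [he, if_false, altLoop_eq, Bool.false_or]
    cases h1 : (tags.map PySem.Str.lower).contains "tech" <;>
      cases h2 : (tags.map PySem.Str.lower).contains "classical music" <;>
        simp
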